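-- pv_equiv track=rewrite | github.com/SeanStafford/ARCHER | archer/utils/text_processing.py | extract_balanced_delimiters
-- ===== SOURCE A (Python) =====
-- from typing import List, Tuple
--
-- def extract_balanced_delimiters(
--     text: str,
--     start_pos: int,
--     open_char: str = '{',
--     close_char: str = '}',
--     escape_char: str = '\\'
-- ) -> Tuple[str, int]:
--     """
--     Extract content between balanced delimiters, handling escaped characters.
--
--     Assumes start_pos is AT or AFTER an opening delimiter. Counts nested delimiters
--     to find the matching closing delimiter, skipping escaped characters.
--
--     Args:
--         text: Text containing delimited content
--         start_pos: Position at or after opening delimiter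
--         open_char: Opening delimiter character (default: '{')
--         close_char: Closing delimiter character (default: '}')
--         escape_char: Character used for escaping (default: '\\')
--
--     Returns:
--         (content, end_pos) where:
--         - content: Text between the delimiters (excluding delimiters themselves)
--         - end_pos: Position after the closing delimiter
--
--     Raises:
--         ValueError: If delimiters are unmatched
--
--     Example:
--         >>> text = "foo {bar {nested} baz} qux"
--         >>> content, end = extract_balanced_delimiters(text, 4)  # At opening {
--         >>> content
--         'bar {nested} baz'
--         >>> text2 = "code [list [1, 2] more] end"
--         >>> content2, end2 = extract_balanced_delimiters(text2, 5, '[', ']')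
--         >>> content2
--         'list [1, 2] more'
--     """
--     depth = 1  # Start at 1 (already inside opening delimiter)
--     pos = start_pos
--
--     while pos < len(text) and depth > 0:
--         if text[pos] == escape_char:
--             # Skip escaped character
--             pos += 2
--             continue
--         elif text[pos] == open_char:
--             depth += 1
--         elif text[pos] == close_char:
--             depth -= 1
--         pos += 1
--
--     if depth != 0:
--         raise ValueError(
--             f"Unmatched {open_char}{close_char} delimiters starting at position {start_pos}"
--         )
--
--     # content is from start_pos to pos-1 (excluding closing delimiter)
--     content = text[start_pos:pos - 1]
--     return content, pos
-- ===== SOURCE B (Python) =====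
-- from typing import List, Tuple
--
--
-- def _effective_chars(text: str, start_pos: int, escape_char: str) -> List[Tuple[int, str]]:
--     """One pass: the (position, char) pairs the scanner actually sees,
--     with every escape character and the character it protects removed."""
--     out = []
--     i = start_pos
--     n = len(text)
--     while i < n:
--         c = text[i]
--         if c == escape_char:
--             i += 2
--         else:
--             out.append((i, c))
--             i += 1
--     return out
--
--
-- def extract_balanced_delimiters(
--     text: str,
--     start_pos: int,
--     open_char: str = '{',
--     close_char: str = '}',
--     escape_char: str = '\\'
-- ) -> Tuple[str, int]:
--     depth = 1
--     for i, c in _effective_chars(text, start_pos, escape_char):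
--         depth += (c == open_char) - (c == close_char)
--         if depth == 0:
--             return text[start_pos:i], i + 1
--     raise ValueError(
--         f"Unmatched {open_char}{close_char} delimiters starting at position {start_pos}"
--     )
-- ===== Notes on version B (the rewrite author's own statement) =====
-- stated objective: alternative
-- what changed: A's single while loop interleaving escape handling with a depth counter is split into two phases: one pass strips escapes into a list of effective (position, char) pairs, then a for-loop over that list updates the depth arithmetically (depth += (c==open) - (c==close)) and returns at the first zero.
import Mathlib
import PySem

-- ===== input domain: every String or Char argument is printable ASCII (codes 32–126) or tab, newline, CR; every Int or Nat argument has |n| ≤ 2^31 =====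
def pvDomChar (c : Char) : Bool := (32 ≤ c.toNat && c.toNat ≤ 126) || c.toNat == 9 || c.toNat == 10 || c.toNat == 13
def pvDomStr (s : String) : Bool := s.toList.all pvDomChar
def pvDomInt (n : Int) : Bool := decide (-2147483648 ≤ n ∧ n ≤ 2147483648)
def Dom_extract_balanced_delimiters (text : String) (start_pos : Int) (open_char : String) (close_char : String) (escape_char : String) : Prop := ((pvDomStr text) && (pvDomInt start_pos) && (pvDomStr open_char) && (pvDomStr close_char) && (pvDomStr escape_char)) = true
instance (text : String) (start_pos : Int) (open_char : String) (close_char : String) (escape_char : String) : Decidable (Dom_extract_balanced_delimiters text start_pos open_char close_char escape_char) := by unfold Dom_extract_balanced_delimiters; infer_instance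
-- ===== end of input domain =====

-- B replaces A's single while-loop (escape handling interleaved with a depth counter) by two
-- phases: strip escapes into a list of effective (position, char) pairs, then scan that list for
-- the first point where the arithmetic depth update hits zero.  Same O(n) cost ("alternative").
-- Equivalence is about return values on Pre_ (exactly where the Python A returns normally).

-- ===== PORT A =====
-- A's while loop: state (pos, depth); returns the final (pos, depth).
def ebdLoopA (chars : List Char) (open_char close_char escape_char : String)
    (pos depth : Int) : Int × Int :=
  if _h : pos < (chars.length : Int) ∧ 0 < depth then
    match PySem.List.pyGet? chars pos with
    | none => (pos, depth)  -- Python IndexError (pos < -len); outside Pre_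
    | some c =>
      if String.ofList [c] == escape_char then
        ebdLoopA chars open_char close_char escape_char (pos + 2) depth
      else if String.ofList [c] == open_char then
        ebdLoopA chars open_char close_char escape_char (pos + 1) (depth + 1)
      else if String.ofList [c] == close_char then
        ebdLoopA chars open_char close_char escape_char (pos + 1) (depth - 1)
      else
        ebdLoopA chars open_char close_char escape_char (pos + 1) depth
  else (pos, depth)
termination_by ((chars.length : Int) - pos).toNat
decreasing_by all_goals omega

def extract_balanced_delimiters (text : String) (start_pos : Int) (open_char : String)
    (close_char : String) (escape_char : String) : String × Int :=
  let r := ebdLoopA text.toList open_char close_char escape_char start_pos 1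
  if r.2 ≠ 0 then ("", start_pos)  -- Python raises ValueError; outside Pre_
  else (PySem.Str.slice text (some start_pos) (some (r.1 - 1)), r.1)

-- ===== PORT B =====
-- _effective_chars: the (position, char) pairs the scanner sees, escapes removed.
def ebdEffective (chars : List Char) (escape_char : String) (pos : Int) : List (Int × Char) :=
  if _h : pos < (chars.length : Int) then
    match PySem.List.pyGet? chars pos with
    | none => []  -- Python IndexError (pos < -len); outside Pre_
    | some c =>
      if String.ofList [c] == escape_char then ebdEffective chars escape_char (pos + 2)
      else (pos, c) :: ebdEffective chars escape_char (pos + 1)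
  else []
termination_by ((chars.length : Int) - pos).toNat
decreasing_by all_goals omega

-- B's for-loop: first position where the depth hits 0.
def ebdFindZero (open_char close_char : String) (depth : Int) :
    List (Int × Char) → Option Int
  | [] => none
  | (i, c) :: rest =>
    let d := depth + (if String.ofList [c] == open_char then (1 : Int) else 0)
                   - (if String.ofList [c] == close_char then (1 : Int) else 0)
    if d = 0 then some i else ebdFindZero open_char close_char d rest

def extract_balanced_delimiters_alt (text : String) (start_pos : Int) (open_char : String)
    (close_char : String) (escape_char : String) : String × Int :=
  match ebdFindZero open_char close_char 1 (ebdEffective text.toList escape_char start_pos) with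
  | some i => (PySem.Str.slice text (some start_pos) (some i), i + 1)
  | none => ("", start_pos)  -- Python raises ValueError; outside Pre_

-- ===== PRECONDITION & SPEC =====
-- The character sequence A's scanner walks through from start position p: for negative p Python's
-- indexing reads the tail of the string first (text[p] = text[len+p]) and then, once the position
-- reaches 0, the whole string.
def ebdStream (chars : List Char) (pos : Int) : List Char :=
  if pos < 0 then chars.drop (chars.length + pos).toNat ++ chars else chars.drop pos.toNat

-- Token stream of a char list: an escape char and the char it protects are dropped.
def ebdToks (escape_char : String) : List Char → List Char
  | [] => []
  | [c] => if String.ofList [c] == escape_char then [] else [c]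
  | c :: d :: rest =>
    if String.ofList [c] == escape_char then ebdToks escape_char rest
    else c :: ebdToks escape_char (d :: rest)

-- Pre_ excludes exactly the inputs on which the Python A raises: start_pos < -len(text)
-- (IndexError) and unmatched delimiters (ValueError: over the escape-stripped token stream of the
-- walked characters, the depth, starting at 1, never reaches 0).
def Pre_extract_balanced_delimiters (text : String) (start_pos : Int) (open_char : String)
    (close_char : String) (escape_char : String) : Prop :=
  -(text.toList.length : Int) ≤ start_pos ∧
  ∃ k < (ebdToks escape_char (ebdStream text.toList start_pos)).length + 1,
    (((ebdToks escape_char (ebdStream text.toList start_pos)).take k).countP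
        (fun c => String.ofList [c] == open_char) : Int) + 1 ≤
    (((ebdToks escape_char (ebdStream text.toList start_pos)).take k).countP
        (fun c => String.ofList [c] == close_char) : Int)

instance (text : String) (start_pos : Int) (open_char : String) (close_char : String) (escape_char : String) : Decidable (Pre_extract_balanced_delimiters text start_pos open_char close_char escape_char) := by unfold Pre_extract_balanced_delimiters; infer_instance

def pvWitness_extract_balanced_delimiters : String × Int × String × String × String :=
  ("bar {nested} baz} qux", 0, "{", "}", "\\")

def Spec_extract_balanced_delimiters (text : String) (start_pos : Int) (open_char : String) (close_char : String) (escape_char : String) (out : String × Int) : Prop := out = extract_balanced_delimiters_alt text start_pos open_char close_char escape_char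

instance (text : String) (start_pos : Int) (open_char : String) (close_char : String) (escape_char : String) (out : String × Int) : Decidable (Spec_extract_balanced_delimiters text start_pos open_char close_char escape_char out) := by unfold Spec_extract_balanced_delimiters; infer_instance

-- ===== CLAIM =====
def Claim_equal_extract_balanced_delimiters : Prop := ∀ (text : String) (start_pos : Int) (open_char : String) (close_char : String) (escape_char : String), Dom_extract_balanced_delimiters text start_pos open_char close_char escape_char → Pre_extract_balanced_delimiters text start_pos open_char close_char escape_char → Spec_extract_balanced_delimiters text start_pos open_char close_char escape_char (extract_balanced_delimiters text start_pos open_char close_char escape_char)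

-- ===== LEMMAS AND PROOFS =====

theorem pvWitness_ok :
    Pre_extract_balanced_delimiters
      pvWitness_extract_balanced_delimiters.1 pvWitness_extract_balanced_delimiters.2.1
      pvWitness_extract_balanced_delimiters.2.2.1 pvWitness_extract_balanced_delimiters.2.2.2.1
      pvWitness_extract_balanced_delimiters.2.2.2.2 := by decide

theorem ebdGet_some (chars : List Char) (pos : Int)
    (h1 : -(chars.length : Int) ≤ pos) (h2 : pos < (chars.length : Int)) :
    ∃ c, PySem.List.pyGet? chars pos = some c := by
  simp only [PySem.List.pyGet?, PySem.List.pyIdx?]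
  by_cases h : 0 ≤ pos
  · rw [if_pos h, if_pos h2]
    simp only [Option.bind_some]
    exact ⟨chars[pos.toNat]'(by omega), List.getElem?_eq_getElem (by omega)⟩
  · rw [if_neg h, if_pos h1]
    simp only [Option.bind_some]
    exact ⟨chars[chars.length - (-pos).toNat]'(by omega), List.getElem?_eq_getElem (by omega)⟩

theorem ebdGet_eq (chars : List Char) (pos : Int) (c : Char)
    (hc : PySem.List.pyGet? chars pos = some c)
    (h1 : -(chars.length : Int) ≤ pos) (h2 : pos < (chars.length : Int)) :
    ∃ j : Nat, j < chars.length ∧ chars[j]? = some c ∧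
      ((0 ≤ pos ∧ j = pos.toNat) ∨ (pos < 0 ∧ (j : Int) = chars.length + pos)) := by
  simp only [PySem.List.pyGet?, PySem.List.pyIdx?] at hc
  by_cases h : 0 ≤ pos
  · rw [if_pos h, if_pos h2] at hc
    simp only [Option.bind_some] at hc
    exact ⟨pos.toNat, by omega, hc, Or.inl ⟨h, rfl⟩⟩
  · rw [if_neg h, if_pos h1] at hc
    simp only [Option.bind_some] at hc
    exact ⟨chars.length - (-pos).toNat, by omega, hc, Or.inr ⟨by omega, by omega⟩⟩

theorem ebdStream_cons (chars : List Char) (pos : Int) (c : Char)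
    (h1 : -(chars.length : Int) ≤ pos) (h2 : pos < (chars.length : Int))
    (hc : PySem.List.pyGet? chars pos = some c) :
    ebdStream chars pos = c :: ebdStream chars (pos + 1) := by
  obtain ⟨j, hj, hcj, hcase⟩ := ebdGet_eq chars pos c hc h1 h2
  have hdropj : chars.drop j = c :: chars.drop (j + 1) := by
    rw [List.drop_eq_getElem_cons hj]
    rw [List.getElem?_eq_getElem hj] at hcj
    simp at hcj
    rw [hcj]
  rcases hcase with ⟨hp, hjj⟩ | ⟨hp, hjj⟩
  · -- nonnegative position
    rw [ebdStream, if_neg (by omega), ebdStream, if_neg (by omega)]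
    subst hjj
    rw [hdropj]
    congr 2
    omega
  · -- negative position
    rw [ebdStream, if_pos hp]
    have hlenj : (chars.length + pos).toNat = j := by omega
    rw [hlenj, hdropj]
    by_cases hp1 : pos + 1 < 0
    · rw [ebdStream, if_pos hp1]
      have : (chars.length + (pos + 1)).toNat = j + 1 := by omega
      rw [this]
      simp
    · -- pos + 1 = 0: tail is the whole list
      have hp0 : pos + 1 = 0 := by omega
      rw [ebdStream, if_neg hp1]
      have hj1 : j + 1 = chars.length := by omega
      have : (pos + 1).toNat = 0 := by omega
      rw [this]
      rw [hj1, List.drop_length]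
      simp

theorem ebdToks_cons_esc (ec : String) (c : Char) (l : List Char)
    (hc : (String.ofList [c] == ec) = true) :
    ebdToks ec (c :: l) = ebdToks ec l.tail := by
  cases l <;> simp [ebdToks, hc]

theorem ebdToks_cons_ne (ec : String) (c : Char) (l : List Char)
    (hc : ¬ (String.ofList [c] == ec) = true) :
    ebdToks ec (c :: l) = c :: ebdToks ec l := by
  cases l <;> simp [ebdToks, hc]

theorem ebdStream_nil (chars : List Char) (pos : Int)
    (h : (chars.length : Int) ≤ pos) : ebdStream chars pos = [] := by
  rw [ebdStream, if_neg (by omega)]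
  exact List.drop_eq_nil_of_le (by omega)

theorem ebdEffective_map_snd (chars : List Char) (ec : String) :
    ∀ (n : Nat) (pos : Int), ((chars.length : Int) - pos).toNat ≤ n →
      -(chars.length : Int) ≤ pos →
      (ebdEffective chars ec pos).map Prod.snd = ebdToks ec (ebdStream chars pos) := by
  intro n
  induction n with
  | zero =>
    intro pos hn hpos
    rw [ebdEffective, dif_neg (by omega), ebdStream_nil chars pos (by omega)]
    simp [ebdToks]
  | succ n ih =>
    intro pos hn hpos
    by_cases hlt : pos < (chars.length : Int)
    · obtain ⟨c, hc⟩ := ebdGet_some chars pos hpos hlt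
      rw [ebdEffective, dif_pos hlt]
      simp only [hc]
      rw [ebdStream_cons chars pos c hpos hlt hc]
      by_cases hesc : (String.ofList [c] == ec) = true
      · simp only [hesc, if_true]
        rw [ebdToks_cons_esc ec c _ hesc]
        by_cases hlt1 : pos + 1 < (chars.length : Int)
        · obtain ⟨c', hc'⟩ := ebdGet_some chars (pos + 1) (by omega) hlt1
          rw [ebdStream_cons chars (pos + 1) c' (by omega) hlt1 hc']
          simp only [List.tail_cons]
          have : pos + 1 + 1 = pos + 2 := by omega
          rw [this]
          exact ih (pos + 2) (by omega) (by omega)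
        · rw [ebdStream_nil chars (pos + 1) (by omega)]
          rw [ebdEffective, dif_neg (by omega)]
          simp [ebdToks]
      · simp only [hesc, if_false, Bool.false_eq_true]
        rw [ebdToks_cons_ne ec c _ hesc, List.map_cons]
        rw [ih (pos + 1) (by omega) (by omega)]
    · rw [ebdEffective, dif_neg hlt, ebdStream_nil chars pos (by omega)]
      simp [ebdToks]

-- L2: if B's scan never hits zero, no prefix of the token stream closes depth d.
theorem ebdFindZero_none (oc cc : String) :
    ∀ (l : List (Int × Char)) (d : Int), 0 < d →
      ebdFindZero oc cc d l = none →
      ∀ k : Nat,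
        (((l.map Prod.snd).take k).countP (fun c => String.ofList [c] == cc) : Int) <
        (((l.map Prod.snd).take k).countP (fun c => String.ofList [c] == oc) : Int) + d := by
  intro l
  induction l with
  | nil => intro d hd _ k; simp; omega
  | cons x rest ih =>
    obtain ⟨i, c⟩ := x
    intro d hd hnone k
    rw [ebdFindZero] at hnone
    set d' := d + (if String.ofList [c] == oc then (1 : Int) else 0)
                - (if String.ofList [c] == cc then (1 : Int) else 0) with hd'
    by_cases hz : d' = 0
    · rw [if_pos hz] at hnone; exact absurd hnone (by simp)
    · rw [if_neg hz] at hnone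
      have hd'pos : 0 < d' := by
        by_cases h1 : String.ofList [c] == oc <;> by_cases h2 : String.ofList [c] == cc <;>
          simp [h1, h2] at hd' <;> omega
      have := ih d' hd'pos hnone
      cases k with
      | zero => simp; omega
      | succ k =>
        have hk := this k
        simp only [List.map_cons, List.take_succ_cons, List.countP_cons]
        by_cases h1 : String.ofList [c] == oc <;> by_cases h2 : String.ofList [c] == cc <;>
          simp [h1, h2] at hd' hk ⊢ <;> omega

-- L3: if B's scan hits zero at i, A's loop ends at (i + 1, 0).
theorem ebdLoopA_of_findZero (chars : List Char) (oc cc ec : String) (hne : oc ≠ cc) :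
    ∀ (n : Nat) (pos d i : Int), ((chars.length : Int) - pos).toNat ≤ n →
      -(chars.length : Int) ≤ pos → 0 < d →
      ebdFindZero oc cc d (ebdEffective chars ec pos) = some i →
      ebdLoopA chars oc cc ec pos d = (i + 1, 0) := by
  intro n
  induction n with
  | zero =>
    intro pos d i hn hpos hd hfz
    rw [ebdEffective, dif_neg (by omega)] at hfz
    simp [ebdFindZero] at hfz
  | succ n ih =>
    intro pos d i hn hpos hd hfz
    by_cases hlt : pos < (chars.length : Int)
    · obtain ⟨c, hc⟩ := ebdGet_some chars pos hpos hlt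
      rw [ebdEffective, dif_pos hlt] at hfz
      simp only [hc] at hfz
      rw [ebdLoopA, dif_pos ⟨hlt, hd⟩]
      simp only [hc]
      by_cases hesc : (String.ofList [c] == ec) = true
      · simp only [hesc, if_true] at hfz ⊢
        exact ih (pos + 2) d i (by omega) (by omega) hd hfz
      · simp only [hesc, if_false, Bool.false_eq_true] at hfz ⊢
        rw [ebdFindZero] at hfz
        by_cases hoc : (String.ofList [c] == oc) = true
        · have hcc : ¬ (String.ofList [c] == cc) = true := by
            intro h
            exact hne (by rw [← beq_iff_eq.mp hoc, beq_iff_eq.mp h])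
          simp only [hoc, hcc, if_true, if_false, Bool.false_eq_true] at hfz ⊢
          rw [if_neg (by omega)] at hfz
          have he : d + 1 - 0 = d + 1 := by omega
          rw [he] at hfz
          exact ih (pos + 1) (d + 1) i (by omega) (by omega) (by omega) hfz
        · simp only [hoc, if_false, Bool.false_eq_true] at hfz ⊢
          by_cases hcc : (String.ofList [c] == cc) = true
          · simp only [hcc, if_true] at hfz ⊢
            have hd' : d + 0 - 1 = d - 1 := by omega
            rw [hd'] at hfz
            by_cases h1 : d = 1
            · rw [if_pos (by omega)] at hfz
              have hi : i = pos := by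
                have := Option.some.inj hfz; omega
              subst h1
              rw [ebdLoopA, dif_neg (by omega)]
              simp [hi]
            · rw [if_neg (by omega)] at hfz
              exact ih (pos + 1) (d - 1) i (by omega) (by omega) (by omega) hfz
          · simp only [hcc, if_false, Bool.false_eq_true] at hfz ⊢
            have hd' : d + 0 - 0 = d := by omega
            rw [hd'] at hfz
            rw [if_neg (by omega)] at hfz
            exact ih (pos + 1) d i (by omega) (by omega) hd hfz
    · rw [ebdEffective, dif_neg hlt] at hfz
      simp [ebdFindZero] at hfz

-- ===== VERDICT =====
theorem extract_balanced_delimiters_spec : Claim_equal_extract_balanced_delimiters := by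
  intro text start_pos oc cc ec _hdom hpre
  obtain ⟨h0, k, hk, hcnt⟩ := hpre
  unfold Spec_extract_balanced_delimiters
  by_cases hocc : oc = cc
  · exfalso
    subst hocc
    omega
  · cases hfz : ebdFindZero oc cc 1 (ebdEffective text.toList ec start_pos) with
    | none =>
      exfalso
      have h2 := ebdFindZero_none oc cc (ebdEffective text.toList ec start_pos) 1 one_pos hfz k
      rw [ebdEffective_map_snd text.toList ec ((text.toList.length : Int) - start_pos).toNat
            start_pos (le_refl _) h0] at h2
      omega
    | some i =>
      have hA := ebdLoopA_of_findZero text.toList oc cc ec hocc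
        ((text.toList.length : Int) - start_pos).toNat start_pos 1 i (le_refl _) h0 one_pos hfz
      simp only [extract_balanced_delimiters, extract_balanced_delimiters_alt, hA, hfz]
      norm_num
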